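-- pv_equiv track=rewrite | github.com/SamWheating/AdventOfCode2023 | 12/solution.py | get_subproblem
-- ===== SOURCE A (Python) =====
-- from typing import Tuple, Dict
--
-- def get_subproblem(springs, reqs) -> Tuple[str, Tuple[int]]:
--     """removes the solved part of the problem, as it has no affect on the result.
--
--     i.e get_subproblem("##.????", (2,1,1)) -> "????", (1,1)
--
--     This will also increase cache hit rate
--     """
--     immutable_up_to = 0
--     counting = False
--     for i, s in enumerate(springs):
--         if s == "#":
--             counting = True
--         if s == ".":
--             immutable_up_to = i + 1
--             if counting:
--                 reqs = reqs[1:] # remove one of the groups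
--                 counting = False
--         if s == "?":
--             break
--
--     return springs[immutable_up_to:], reqs
-- ===== SOURCE B (Python) =====
-- def get_subproblem(springs, reqs):
--     """Trim the solved (fully determined) prefix from the puzzle state.
--
--     Computes the cut point directly: the solved part runs through the last '.'
--     before the first '?'; each '.'-separated chunk in it that contains a '#'
--     consumes one requirement group.
--     """
--     head = springs.split("?")[0]
--     solved = head[:head.rfind(".") + 1]
--     count = sum(1 for seg in solved.split(".") if "#" in seg)
--     return springs[len(solved):], reqs[count:]
-- ===== Notes on version B (the rewrite author's own statement) =====
-- stated objective: simpler
-- what changed: Replaces A's single stateful scan (enumerate loop maintaining a 'counting' flag and popping reqs one by one) with a direct computation: split off the prefix before the first '?', cut it at the last '.' via rfind, and count the '.'-separated chunks containing '#' to slice reqs once.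
import Mathlib
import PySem

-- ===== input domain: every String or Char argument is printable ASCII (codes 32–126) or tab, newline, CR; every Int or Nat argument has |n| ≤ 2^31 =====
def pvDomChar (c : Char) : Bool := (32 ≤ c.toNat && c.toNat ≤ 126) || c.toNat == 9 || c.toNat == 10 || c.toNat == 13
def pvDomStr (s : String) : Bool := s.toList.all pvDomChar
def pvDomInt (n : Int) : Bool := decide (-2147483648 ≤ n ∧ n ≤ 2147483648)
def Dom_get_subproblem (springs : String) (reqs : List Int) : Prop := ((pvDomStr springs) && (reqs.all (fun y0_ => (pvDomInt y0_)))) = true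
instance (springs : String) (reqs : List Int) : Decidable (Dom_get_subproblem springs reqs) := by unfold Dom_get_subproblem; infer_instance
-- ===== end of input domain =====

-- B computes the cut point directly (split at first '?', rfind the last '.', count '#'-chunks)
-- instead of A's stateful scan; objective: simpler.

-- ===== PORT A =====
-- A's for-loop: state (immutable_up_to, counting, reqs); 'reqs[1:]' is List.drop 1 (nonnegative slice).
def pvLoopA : List Char → Nat → Nat → Bool → List Int → Nat × List Int
  | [], _, up, _, reqs => (up, reqs)
  | s :: rest, i, up, counting, reqs =>
    let counting1 := if s = '#' then true else counting
    let st : Nat × List Int × Bool :=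
      if s = '.' then
        (i + 1, if counting1 then (reqs.drop 1, false) else (reqs, counting1))
      else (up, (reqs, counting1))
    if s = '?' then (st.1, st.2.1)                  -- 'break'
    else pvLoopA rest (i + 1) st.1 st.2.2 st.2.1

def get_subproblem (springs : String) (reqs : List Int) : String × List Int :=
  let r := pvLoopA springs.toList 0 0 false reqs
  (String.mk (springs.toList.drop r.1), r.2)        -- springs[immutable_up_to:] (index ≥ 0)

-- ===== PORT B =====
def get_subproblem_alt (springs : String) (reqs : List Int) : String × List Int :=
  let l := springs.toList
  let head := (PySem.Chars.splitOn l ['?']).headD []            -- springs.split("?")[0]  (split is never empty)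
  let solved := head.take (PySem.Chars.rfind head ['.'] + 1).toNat   -- head[:head.rfind(".") + 1]
  let count := (PySem.Chars.splitOn solved ['.']).countP
      (fun seg => PySem.Chars.isIn ['#'] seg)                   -- sum(1 for seg in solved.split(".") if "#" in seg)
  (String.mk (l.drop solved.length), reqs.drop count)           -- springs[len(solved):], reqs[count:]

-- ===== PRECONDITION & SPEC =====
def Spec_get_subproblem (springs : String) (reqs : List Int) (out : String × List Int) : Prop := out = get_subproblem_alt springs reqs
instance (springs : String) (reqs : List Int) (out : String × List Int) : Decidable (Spec_get_subproblem springs reqs out) := by unfold Spec_get_subproblem; infer_instance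

-- ===== CLAIM (what is proved, stated in full; the proofs are below) =====
def Claim_equal_get_subproblem : Prop := ∀ (springs : String) (reqs : List Int), Dom_get_subproblem springs reqs → Spec_get_subproblem springs reqs (get_subproblem springs reqs)

-- ===== LEMMAS AND PROOFS =====
def pvSplit (sep : Char) : List Char → List (List Char)
  | [] => [[]]
  | c :: rest =>
    if c = sep then [] :: pvSplit sep rest
    else match pvSplit sep rest with
      | s :: ss => (c :: s) :: ss
      | [] => [[c]]
theorem pvSplit_ne_nil (sep : Char) (l : List Char) : pvSplit sep l ≠ [] := by
  cases l with
  | nil => simp [pvSplit]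
  | cons c rest =>
    simp only [pvSplit]
    split
    · simp
    · split <;> simp_all

theorem modifyHead_fun_id (l : List (List Char)) : List.modifyHead (fun x => x) l = l := by
  cases l <;> simp

theorem splitOn_go_eq (sep : Char) (fuel : Nat) : ∀ (l cur : List Char) (acc : List (List Char)),
    l.length ≤ fuel →
    PySem.Chars.splitOn.go [sep] fuel l cur acc
      = acc.reverse ++ (pvSplit sep l).modifyHead (cur.reverse ++ ·) := by
  induction fuel with
  | zero =>
    intro l cur acc h
    have : l = [] := by cases l <;> simp_all
    subst this
    simp [PySem.Chars.splitOn.go, pvSplit]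
  | succ fuel ih =>
    intro l cur acc h
    cases l with
    | nil => simp [PySem.Chars.splitOn.go, pvSplit]
    | cons c rest =>
      rw [PySem.Chars.splitOn.go]
      by_cases hc : c = sep
      · have hpre : List.isPrefixOf [sep] (c :: rest) = true := by simp [List.isPrefixOf, hc]
        simp only [hpre, if_true, List.length_cons, List.length_nil, Nat.zero_add,
          List.drop_succ_cons, List.drop_zero]
        rw [ih rest [] (cur.reverse :: acc) (by simpa using Nat.le_of_succ_le_succ h)]
        simp [pvSplit, hc, modifyHead_fun_id]
      · have hpre : List.isPrefixOf [sep] (c :: rest) = false := by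
          simp [List.isPrefixOf]; exact fun h => absurd h.symm hc
        simp only [hpre, Bool.false_eq_true, if_false]
        rw [ih rest (c :: cur) acc (by simpa using Nat.le_of_succ_le_succ h)]
        simp only [pvSplit, hc, if_false]
        rcases hsp : pvSplit sep rest with _ | ⟨s, ss⟩
        · exact absurd hsp (pvSplit_ne_nil sep rest)
        · simp [List.modifyHead, List.append_assoc]

theorem splitOn_eq_pvSplit (sep : Char) (l : List Char) :
    PySem.Chars.splitOn l [sep] = pvSplit sep l := by
  rw [PySem.Chars.splitOn, splitOn_go_eq sep (l.length + 1) l [] [] (by omega)]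
  simp [modifyHead_fun_id]

theorem headD_pvSplit_q (l : List Char) :
    (pvSplit '?' l).headD [] = l.takeWhile (fun c => decide (c ≠ '?')) := by
  induction l with
  | nil => simp [pvSplit]
  | cons c rest ih =>
    simp only [pvSplit, List.takeWhile]
    by_cases hc : c = '?'
    · simp [hc]
    · simp only [hc, if_false, decide_not, decide_eq_true_eq]
      rcases hsp : pvSplit '?' rest with _ | ⟨s, ss⟩
      · exact absurd hsp (pvSplit_ne_nil '?' rest)
      · simp only [hsp, List.headD_cons] at ih
        simpa [ih] using rfl

theorem rfind_go_ge (s sub : List Char) (j : Nat) : -1 ≤ PySem.Chars.rfind.go s sub j := by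
  induction j with
  | zero => rw [PySem.Chars.rfind.go]; split <;> omega
  | succ j ih => rw [PySem.Chars.rfind.go]; split <;> omega

theorem rfind_go_cons (c : Char) (rest : List Char) (j : Nat) :
    PySem.Chars.rfind.go (c :: rest) ['.'] (j + 1)
      = (if PySem.Chars.rfind.go rest ['.'] j = -1 then (if c = '.' then 0 else -1)
         else PySem.Chars.rfind.go rest ['.'] j + 1) := by
  induction j with
  | zero =>
    rw [PySem.Chars.rfind.go, PySem.Chars.rfind.go, PySem.Chars.rfind.go]
    by_cases hr : List.isPrefixOf ['.'] rest = true
    · simp [hr]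
    · simp only [List.drop_succ_cons, List.drop_zero, hr]
      by_cases hc : c = '.'
      · simp [List.isPrefixOf, hc, hr]
      · have : List.isPrefixOf ['.'] (c :: rest) = false := by
          simp [List.isPrefixOf]; exact fun h => absurd h.symm hc
        simp [this, hr, hc]
  | succ j ih =>
    rw [PySem.Chars.rfind.go]
    conv_rhs => rw [PySem.Chars.rfind.go]
    simp only [List.drop_succ_cons]
    by_cases hp : List.isPrefixOf ['.'] (List.drop (j+1) rest) = true
    · simp [hp]
      omega
    · simp only [hp, Bool.false_eq_true, if_false, ih]

def pvCutW : List Char → Nat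
  | [] => 0
  | c :: rest =>
    if c = '?' then 0
    else if c = '.' then pvCutW rest + 1
    else if pvCutW rest = 0 then 0 else pvCutW rest + 1

def pvCnt : List Char → Bool → Nat
  | [], _ => 0
  | c :: rest, b =>
    if c = '?' then 0
    else
      let b' := if c = '#' then true else b
      if c = '.' then (if b' then 1 else 0) + pvCnt rest false
      else pvCnt rest b'

theorem rfind_cons (c : Char) (rest : List Char) :
    PySem.Chars.rfind (c :: rest) ['.']
      = (if PySem.Chars.rfind rest ['.'] = -1 then (if c = '.' then 0 else -1)
         else PySem.Chars.rfind rest ['.'] + 1) := by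
  rw [PySem.Chars.rfind, PySem.Chars.rfind, List.length_cons]
  exact rfind_go_cons c rest rest.length

theorem rfind_add_one (s : List Char) (hq : '?' ∉ s) :
    PySem.Chars.rfind s ['.'] + 1 = (pvCutW s : Int) := by
  induction s with
  | nil =>
    rw [PySem.Chars.rfind, PySem.Chars.rfind.go.eq_def]
    simp [List.isPrefixOf, pvCutW]
  | cons c rest ih =>
    have hq' : '?' ∉ rest := fun h => hq (List.mem_cons_of_mem _ h)
    have hcq : c ≠ '?' := fun h => hq (by simp [h])
    have ih' := ih hq'
    have hge : -1 ≤ PySem.Chars.rfind rest ['.'] := by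
      rw [PySem.Chars.rfind]; exact rfind_go_ge _ _ _
    rw [rfind_cons]
    simp only [pvCutW, hcq, if_false]
    by_cases hr : PySem.Chars.rfind rest ['.'] = -1
    · have h0 : pvCutW rest = 0 := by omega
      by_cases hc : c = '.' <;> simp [hr, hc, h0]
    · have h0 : pvCutW rest ≠ 0 := by omega
      by_cases hc : c = '.' <;> simp [hr, hc, h0] <;> omega

theorem isIn_hash (s : List Char) : PySem.Chars.isIn ['#'] s = decide ('#' ∈ s) := by
  by_cases h : '#' ∈ s
  · simp only [h, decide_true]
    rw [PySem.Chars.isIn_iff_infix]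
    obtain ⟨l1, l2, rfl⟩ := List.append_of_mem h
    exact ⟨l1, l2, by simp⟩
  · simp only [h, decide_false]
    rw [PySem.Chars.isIn_eq_false_iff]
    intro hinf
    exact h (hinf.subset (by simp))

def pvSegCnt : Bool → List (List Char) → Nat
  | _, [] => 0
  | b, s :: rest => (if b || PySem.Chars.isIn ['#'] s then 1 else 0) + pvSegCnt false rest

def pvNotQ (c : Char) : Bool := decide (c ≠ '?')

theorem pvNotQ_true {c : Char} (h : c ≠ '?') : pvNotQ c = true := by simp [pvNotQ, h]
theorem pvNotQ_false : pvNotQ '?' = false := by simp [pvNotQ]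

theorem pvCutW_takeWhile (l : List Char) :
    pvCutW (l.takeWhile pvNotQ) = pvCutW l := by
  induction l with
  | nil => simp
  | cons c rest ih =>
    by_cases hc : c = '?'
    · subst hc
      rw [List.takeWhile_cons_of_neg (by rw [pvNotQ_false]; simp)]
      simp [pvCutW]
    · rw [List.takeWhile_cons_of_pos (pvNotQ_true hc)]
      simp only [pvCutW, ih]

theorem pvCnt_takeWhile (l : List Char) (b : Bool) :
    pvCnt (l.takeWhile pvNotQ) b = pvCnt l b := by
  induction l generalizing b with
  | nil => simp
  | cons c rest ih =>
    by_cases hc : c = '?'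
    · subst hc
      rw [List.takeWhile_cons_of_neg (by rw [pvNotQ_false]; simp)]
      simp [pvCnt]
    · rw [List.takeWhile_cons_of_pos (pvNotQ_true hc)]
      simp only [pvCnt, ih]

theorem notMem_takeWhile_q (l : List Char) : '?' ∉ l.takeWhile pvNotQ := by
  intro h
  have := List.mem_takeWhile_imp h
  rw [pvNotQ_false] at this
  exact absurd this (by simp)

theorem pvCutW_le_length (s : List Char) : pvCutW s ≤ s.length := by
  induction s with
  | nil => simp [pvCutW]
  | cons c rest ih =>
    simp only [pvCutW, List.length_cons]
    split
    · omega
    · split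
      · omega
      · split <;> omega

theorem pvCnt_of_cut_zero (s : List Char) (b : Bool) (h : pvCutW s = 0) : pvCnt s b = 0 := by
  induction s generalizing b with
  | nil => simp [pvCnt]
  | cons c rest ih =>
    simp only [pvCutW] at h
    simp only [pvCnt]
    by_cases hq : c = '?'
    · simp [hq]
    · simp only [hq, if_false] at h ⊢
      by_cases hd : c = '.'
      · simp [hd] at h
      · simp only [hd, if_false] at h ⊢
        split at h
        · next h0 => exact ih _ h0
        · omega

theorem pvSegCnt_nil_seg (b : Bool) (ss : List (List Char)) :
    pvSegCnt b ([] :: ss) = (if b then 1 else 0) + pvSegCnt false ss := by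
  simp [pvSegCnt, isIn_hash]

theorem pvCnt_eq_segCnt (s : List Char) : ∀ (b : Bool),
    pvCnt s b = if pvCutW s = 0 then 0 else pvSegCnt b (pvSplit '.' (s.take (pvCutW s))) := by
  induction s with
  | nil => simp [pvCnt, pvCutW]
  | cons c rest ih =>
    intro b
    by_cases hq : c = '?'
    · simp [pvCnt, pvCutW, hq]
    · by_cases hd : c = '.'
      · -- solved = '.' :: rest.take u ; first segment closes here
        subst hd
        have hrec : pvCnt rest false = pvSegCnt false (pvSplit '.' (rest.take (pvCutW rest))) := by
          rw [ih false]
          split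
          · next h0 => simp [h0, pvSplit, pvSegCnt, isIn_hash]
          · rfl
        have hcut : pvCutW ('.' :: rest) = pvCutW rest + 1 := by simp [pvCutW, hq]
        rw [hcut, if_neg (Nat.succ_ne_zero _), List.take_succ_cons]
        have hsp : pvSplit '.' ('.' :: rest.take (pvCutW rest))
            = [] :: pvSplit '.' (rest.take (pvCutW rest)) := by simp [pvSplit]
        rw [hsp, pvSegCnt_nil_seg]
        simp only [pvCnt, hq, if_false, if_true, hrec]
        have : (if ('.' : Char) = '#' then true else b) = b := by simp
        rw [this]
      · by_cases h0 : pvCutW rest = 0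
        · have hc0 : pvCutW (c :: rest) = 0 := by simp [pvCutW, hq, hd, h0]
          rw [if_pos hc0]
          simp only [pvCnt, hq, if_false, hd]
          exact pvCnt_of_cut_zero rest _ h0
        · have hc1 : pvCutW (c :: rest) = pvCutW rest + 1 := by simp [pvCutW, hq, hd, h0]
          rw [hc1, if_neg (Nat.succ_ne_zero _), List.take_succ_cons]
          rcases hsp : pvSplit '.' (rest.take (pvCutW rest)) with _ | ⟨sg, ss⟩
          · exact absurd hsp (pvSplit_ne_nil _ _)
          · have hsp2 : pvSplit '.' (c :: rest.take (pvCutW rest)) = (c :: sg) :: ss := by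
              simp [pvSplit, hd, hsp]
            rw [hsp2]
            simp only [pvCnt, hq, if_false, hd]
            rw [ih _, if_neg h0, hsp]
            simp only [pvSegCnt, isIn_hash]
            by_cases hch : c = '#'
            · simp [hch, eq_comm]
            · have h1 : (decide ('#' ∈ c :: sg) : Bool) = decide ('#' ∈ sg) := by
                simp [hch, eq_comm]
              have h2 : (if c = '#' then true else b) = b := by simp [hch]
              rw [h1, h2]

theorem pvSegCnt_false (segs : List (List Char)) :
    pvSegCnt false segs = segs.countP (fun s => PySem.Chars.isIn ['#'] s) := by
  induction segs with
  | nil => simp [pvSegCnt]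
  | cons s rest ih =>
    simp only [pvSegCnt, ih, List.countP_cons]
    by_cases h : PySem.Chars.isIn ['#'] s = true <;> simp [h] <;> omega

theorem pvLoopA_eq (cs : List Char) :
    ∀ (i up : Nat) (b : Bool) (reqs : List Int),
    pvLoopA cs i up b reqs
      = ((if pvCutW cs = 0 then up else i + pvCutW cs), reqs.drop (pvCnt cs b)) := by
  induction cs with
  | nil => intro i up b reqs; simp [pvLoopA, pvCutW, pvCnt]
  | cons c rest ih =>
    intro i up b reqs
    simp only [pvLoopA]
    by_cases hq : c = '?'
    · simp only [hq, if_true]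
      have hd : ('?' : Char) ≠ '.' := by decide
      subst hq
      simp [pvCutW, pvCnt, hd]
    · simp only [hq, if_false]
      by_cases hd : c = '.'
      · subst hd
        have hh : ('.' : Char) ≠ '#' := by decide
        simp only [hh, if_false, if_true, ih]
        have hcut : pvCutW ('.' :: rest) = pvCutW rest + 1 := by simp [pvCutW, hq]
        have hcnt : pvCnt ('.' :: rest) b = (if b then 1 else 0) + pvCnt rest false := by
          simp [pvCnt, hq, hh]
        rw [hcut, hcnt, if_neg (Nat.succ_ne_zero _)]
        by_cases hb : b
        · subst hb
          simp only [if_true]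
          simp only [Prod.mk.injEq]
          refine ⟨?_, ?_⟩
          · split <;> omega
          · rw [List.drop_drop, Nat.add_comm]
        · simp only [hb, if_false, Bool.false_eq_true]
          simp only [Prod.mk.injEq]
          refine ⟨?_, ?_⟩
          · split <;> omega
          · simp only [Nat.zero_add]
      · simp only [hd, if_false, ih]
        have hcut : pvCutW (c :: rest)
            = if pvCutW rest = 0 then 0 else pvCutW rest + 1 := by simp [pvCutW, hq, hd]
        have hcnt : pvCnt (c :: rest) b = pvCnt rest (if c = '#' then true else b) := by
          simp [pvCnt, hq, hd]
        rw [hcut, hcnt]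
        simp only [Prod.mk.injEq]
        refine ⟨?_, ?_⟩
        · by_cases h0 : pvCutW rest = 0 <;> simp [h0] <;> omega
        · trivial

theorem ports_agree (springs : String) (reqs : List Int) :
    get_subproblem springs reqs = get_subproblem_alt springs reqs := by
  unfold get_subproblem get_subproblem_alt
  dsimp only
  set l := springs.toList with hl
  rw [pvLoopA_eq]
  have hupfix : (if pvCutW l = 0 then 0 else 0 + pvCutW l) = pvCutW l := by split <;> omega
  rw [hupfix]
  -- B side
  rw [splitOn_eq_pvSplit, headD_pvSplit_q]
  rw [show (fun c : Char => decide (c ≠ '?')) = pvNotQ from rfl]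
  set p := l.takeWhile pvNotQ with hp
  have hrf : PySem.Chars.rfind p ['.'] + 1 = (pvCutW p : Int) :=
    rfind_add_one p (notMem_takeWhile_q l)
  rw [hrf, Int.toNat_natCast]
  have hlen : (p.take (pvCutW p)).length = pvCutW p := by
    rw [List.length_take]
    exact Nat.min_eq_left (pvCutW_le_length p)
  rw [hlen, splitOn_eq_pvSplit]
  have hcutp : pvCutW p = pvCutW l := pvCutW_takeWhile l
  have hcount : (pvSplit '.' (p.take (pvCutW p))).countP (fun seg => PySem.Chars.isIn ['#'] seg)
      = pvCnt l false := by
    rw [← pvCnt_takeWhile l false, ← hp]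
    by_cases h0 : pvCutW p = 0
    · rw [pvCnt_of_cut_zero p false h0, h0]
      simp [pvSplit, isIn_hash]
    · rw [← pvSegCnt_false, pvCnt_eq_segCnt p false, if_neg h0]
  rw [hcount, hcutp]

-- ===== VERDICT (by name: the statement is the Claim_ definition above) =====
theorem get_subproblem_spec : Claim_equal_get_subproblem := by
  intro springs reqs _
  unfold Spec_get_subproblem
  exact ports_agree springs reqs
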